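-- pv_equiv track=rewrite | github.com/NasikNafi/VecLex | veclex_metric.py | _bi_gram_match
-- ===== SOURCE A (Python) =====
-- from collections import Counter, deque
--
-- def _bi_gram_match(summ, ref):
--     summ_grams = ( ' '.join(summ[i:i+2]) for i in range(len(summ)-2+1))
--     summ_grams = Counter(summ_grams)
--
--     ref_grams = (ref[i] for i in range(len(ref)))
--     ref_grams = Counter(ref_grams)
--
--     grams = min(summ_grams, ref_grams, key=len)
--     count = sum(min(summ_grams[g], ref_grams[g]) for g in grams)
--     return count
-- ===== SOURCE B (Python) =====
-- from collections import Counter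
--
-- def _bi_gram_match(summ, ref):
--     # Single pass over summ's bigrams, consuming a mutable budget of ref's tokens.
--     budget = Counter(ref)
--     count = 0
--     for i in range(len(summ) - 1):
--         g = ' '.join(summ[i:i+2])
--         if budget[g] > 0:
--             budget[g] -= 1
--             count += 1
--     return count
-- ===== Notes on version B (the rewrite author's own statement) =====
-- stated objective: alternative
-- what changed: Instead of building two Counters and summing per-key minima over the smaller one, B builds only the ref Counter and makes a single consume-and-decrement pass over summ's bigrams, counting each bigram that still has budget.
import Mathlib
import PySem

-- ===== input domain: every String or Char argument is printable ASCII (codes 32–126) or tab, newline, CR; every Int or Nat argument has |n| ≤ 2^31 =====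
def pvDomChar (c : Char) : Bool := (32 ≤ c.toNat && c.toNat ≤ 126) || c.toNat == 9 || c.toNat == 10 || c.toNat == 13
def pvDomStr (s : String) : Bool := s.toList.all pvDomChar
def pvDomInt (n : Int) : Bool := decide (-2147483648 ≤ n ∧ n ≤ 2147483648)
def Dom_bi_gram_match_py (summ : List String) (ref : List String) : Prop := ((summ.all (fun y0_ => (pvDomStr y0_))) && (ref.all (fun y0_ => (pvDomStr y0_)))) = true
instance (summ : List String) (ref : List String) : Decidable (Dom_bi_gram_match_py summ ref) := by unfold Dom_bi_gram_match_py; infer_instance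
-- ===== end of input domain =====

-- B replaces A's two Counters + per-key minima over the smaller dict by a single
-- consume-and-decrement pass over summ's bigrams against a mutable ref budget (same cost; alternative).

-- ===== PORT A =====
def bi_gram_match_py (summ : List String) (ref : List String) : Int :=
  let summ_gram_list : List String :=
    (PySem.List.pyRange 0 (PySem.List.len summ - 2 + 1)).map
      (fun i => PySem.Str.join " " (PySem.List.slice summ (some i) (some (i + 2))))
  let summ_grams : PySem.Dict String Int := PySem.Dict.counter summ_gram_list
  let ref_gram_list : List String :=
    (PySem.List.pyRange 0 (PySem.List.len ref)).map
      (fun i => PySem.List.pyGetD ref i "")  -- i is always in range, so ref[i] = pyGetD ref i ""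
  let ref_grams : PySem.Dict String Int := PySem.Dict.counter ref_gram_list
  -- min(summ_grams, ref_grams, key=len): the dict with fewer keys; ties keep the first argument
  let grams : PySem.Dict String Int :=
    if PySem.Dict.size ref_grams < PySem.Dict.size summ_grams then ref_grams else summ_grams
  (grams.keys.map (fun g => min (summ_grams.getD g 0) (ref_grams.getD g 0))).sum

-- ===== PORT B =====
def bi_gram_match_py_alt (summ : List String) (ref : List String) : Int :=
  let st :=
    (PySem.List.pyRange 0 (PySem.List.len summ - 1)).foldl
      (fun (st : PySem.Dict String Int × Int) i =>
        let g := PySem.Str.join " " (PySem.List.slice summ (some i) (some (i + 2)))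
        if st.1.getD g 0 > 0 then (st.1.modify g 0 (fun v => v - 1), st.2 + 1) else st)
      (PySem.Dict.counter ref, 0)
  st.2

-- ===== PRECONDITION & SPEC =====
def Spec_bi_gram_match_py (summ : List String) (ref : List String) (out : Int) : Prop := out = bi_gram_match_py_alt summ ref
instance (summ : List String) (ref : List String) (out : Int) : Decidable (Spec_bi_gram_match_py summ ref out) := by unfold Spec_bi_gram_match_py; infer_instance

-- ===== CLAIM (what is proved, stated in full; the proofs are below) =====
def Claim_equal_bi_gram_match_py : Prop := ∀ (summ : List String) (ref : List String), Dom_bi_gram_match_py summ ref → Spec_bi_gram_match_py summ ref (bi_gram_match_py summ ref)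

-- ===== LEMMAS AND PROOFS =====

-- B's consume-and-decrement fold counts, per distinct bigram, min(#occurrences left, budget).
theorem pv_consume (S : List String) : ∀ (d : PySem.Dict String Int) (c : Int),
    (∀ g, 0 ≤ d.getD g 0) →
    (S.foldl
      (fun (st : PySem.Dict String Int × Int) g =>
        if st.1.getD g 0 > 0 then (st.1.modify g 0 (fun v => v - 1), st.2 + 1) else st)
      (d, c)).2
    = c + ∑ g ∈ S.toFinset, min ((S.count g : Int)) (d.getD g 0) := by
  induction S with
  | nil => intro d c _; simp
  | cons a T ih =>
    intro d c hd
    by_cases h : d.getD a 0 > 0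
    · have hd' : ∀ g, 0 ≤ (d.modify a 0 (fun v => v - 1)).getD g 0 := by
        intro g
        rw [PySem.Dict.getD_modify]
        split_ifs with hg
        · subst hg; omega
        · exact hd g
      have step : (List.foldl
          (fun (st : PySem.Dict String Int × Int) g =>
            if st.1.getD g 0 > 0 then (st.1.modify g 0 (fun v => v - 1), st.2 + 1) else st)
          (d, c) (a :: T)).2
          = c + 1 + ∑ g ∈ T.toFinset,
              min ((T.count g : Int)) ((d.modify a 0 (fun v => v - 1)).getD g 0) := by
        simpa [h] using ih (d.modify a 0 (fun v => v - 1)) (c + 1) hd'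
      rw [step]
      -- split both sums at the key a
      have hsumT : ∑ g ∈ T.toFinset,
            min ((T.count g : Int)) ((d.modify a 0 (fun v => v - 1)).getD g 0)
          = min ((T.count a : Int)) (d.getD a 0 - 1)
            + ∑ g ∈ T.toFinset.erase a, min ((T.count g : Int)) (d.getD g 0) := by
        by_cases ha : a ∈ T.toFinset
        · rw [← Finset.add_sum_erase _ _ ha, PySem.Dict.getD_modify, if_pos rfl]
          congr 1
          refine Finset.sum_congr rfl (fun g hg => ?_)
          rw [PySem.Dict.getD_modify, if_neg (Finset.mem_erase.mp hg).1]
        · have hc : T.count a = 0 := by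
            simpa using (List.count_eq_zero.mpr (fun hmem => ha (List.mem_toFinset.mpr hmem)))
          rw [Finset.erase_eq_self.mpr ha]
          have hz : min ((T.count a : Int)) (d.getD a 0 - 1) = 0 := by
            rw [hc]; push_cast; omega
          rw [hz, zero_add]
          refine Finset.sum_congr rfl (fun g hg => ?_)
          rw [PySem.Dict.getD_modify, if_neg (by rintro rfl; exact ha hg)]
      have hsumS : ∑ g ∈ (a :: T).toFinset, min (((a :: T).count g : Int)) (d.getD g 0)
          = min (((T.count a : Int)) + 1) (d.getD a 0)
            + ∑ g ∈ T.toFinset.erase a, min ((T.count g : Int)) (d.getD g 0) := by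
        rw [List.toFinset_cons,
            ← Finset.add_sum_erase _ _ (Finset.mem_insert_self a T.toFinset),
            Finset.erase_insert_eq_erase]
        congr 1
        · rw [List.count_cons_self]; push_cast; ring_nf
        · refine Finset.sum_congr rfl (fun g hg => ?_)
          rw [List.count_cons_of_ne (Ne.symm (Finset.mem_erase.mp hg).1)]
      rw [hsumT, hsumS]
      have := hd a
      have hmin : c + 1 + (min ((T.count a : Int)) (d.getD a 0 - 1)
            + ∑ g ∈ T.toFinset.erase a, min ((T.count g : Int)) (d.getD g 0))
          = c + (min (((T.count a : Int)) + 1) (d.getD a 0)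
            + ∑ g ∈ T.toFinset.erase a, min ((T.count g : Int)) (d.getD g 0)) := by
        have hcnt : (0 : Int) ≤ (T.count a : Int) := by positivity
        omega
      exact hmin
    · have hz : d.getD a 0 = 0 := le_antisymm (by omega) (hd a)
      have step : (List.foldl
          (fun (st : PySem.Dict String Int × Int) g =>
            if st.1.getD g 0 > 0 then (st.1.modify g 0 (fun v => v - 1), st.2 + 1) else st)
          (d, c) (a :: T)).2
          = c + ∑ g ∈ T.toFinset, min ((T.count g : Int)) (d.getD g 0) := by
        simpa [h] using ih d c hd
      rw [step]
      congr 1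
      have hsplit : ∑ g ∈ (a :: T).toFinset, min (((a :: T).count g : Int)) (d.getD g 0)
          = min (((a :: T).count a : Int)) (d.getD a 0)
            + ∑ g ∈ T.toFinset.erase a, min ((T.count g : Int)) (d.getD g 0) := by
        rw [List.toFinset_cons,
            ← Finset.add_sum_erase _ _ (Finset.mem_insert_self a T.toFinset),
            Finset.erase_insert_eq_erase]
        congr 1
        refine Finset.sum_congr rfl (fun g hg => ?_)
        rw [List.count_cons_of_ne (Ne.symm (Finset.mem_erase.mp hg).1)]
      rw [hsplit, hz]
      have h1 : min (((a :: T).count a : Int)) 0 = 0 := by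
        have : (0 : Int) ≤ ((a :: T).count a : Int) := by positivity
        omega
      rw [h1, zero_add]
      by_cases ha : a ∈ T.toFinset
      · rw [← Finset.add_sum_erase _ (fun g => min ((T.count g : Int)) (d.getD g 0)) ha]
        have h2 : min ((T.count a : Int)) (d.getD a 0) = 0 := by
          rw [hz]
          have : (0 : Int) ≤ (T.count a : Int) := by positivity
          omega
        rw [h2, zero_add]
      · rw [Finset.erase_eq_self.mpr ha]
  -- the per-key-minimum total is the same whichever side's distinct keys index the sum
theorem pv_sum_min_comm (S R : List String) :
    ∑ g ∈ S.toFinset, min ((S.count g : Int)) ((R.count g : Int))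
    = ∑ g ∈ R.toFinset, min ((S.count g : Int)) ((R.count g : Int)) := by
  have hS : ∑ g ∈ S.toFinset, min ((S.count g : Int)) ((R.count g : Int))
      = ∑ g ∈ S.toFinset ∪ R.toFinset, min ((S.count g : Int)) ((R.count g : Int)) := by
    refine Finset.sum_subset Finset.subset_union_left (fun g _ hg => ?_)
    have hc : S.count g = 0 := List.count_eq_zero.mpr (fun hmem => hg (List.mem_toFinset.mpr hmem))
    have : (0 : Int) ≤ (R.count g : Int) := by positivity
    rw [hc]; push_cast; omega
  have hR : ∑ g ∈ R.toFinset, min ((S.count g : Int)) ((R.count g : Int))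
      = ∑ g ∈ S.toFinset ∪ R.toFinset, min ((S.count g : Int)) ((R.count g : Int)) := by
    refine Finset.sum_subset Finset.subset_union_right (fun g _ hg => ?_)
    have hc : R.count g = 0 := List.count_eq_zero.mpr (fun hmem => hg (List.mem_toFinset.mpr hmem))
    have : (0 : Int) ≤ (S.count g : Int) := by positivity
    rw [hc]; push_cast; omega
  rw [hS, hR]

theorem pv_keys_sum (L : List String) (f : String → Int) :
    ((PySem.Set.ofList L).map f).sum = ∑ g ∈ L.toFinset, f g := by
  have hnd := PySem.Set.nodup_ofList (α := String) L
  have hfin : (PySem.Set.ofList L : List String).toFinset = L.toFinset := by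
    apply Finset.ext; intro x
    simp [List.mem_toFinset, PySem.Set.mem_ofList]
  rw [← List.sum_toFinset f hnd, hfin]

-- the shared bigram list of summ (proof-only helper)
def pvGrams (summ : List String) : List String :=
  (PySem.List.pyRange 0 (PySem.List.len summ - 1)).map
    (fun i => PySem.Str.join " " (PySem.List.slice summ (some i) (some (i + 2))))

theorem pv_A_eq (summ ref : List String) :
    bi_gram_match_py summ ref
    = ∑ g ∈ (pvGrams summ).toFinset, min (((pvGrams summ).count g : Int)) ((ref.count g : Int)) := by
  simp only [bi_gram_match_py]
  rw [show PySem.List.len summ - 2 + 1 = PySem.List.len summ - 1 from by ring]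
  rw [PySem.List.map_pyGetD_pyRange_zero]
  split_ifs with hsz
  · rw [PySem.Dict.keys_counter, pv_keys_sum]
    rw [pv_sum_min_comm (pvGrams summ) ref]
    refine Finset.sum_congr rfl (fun g _ => ?_)
    rw [PySem.Dict.getD_counter, PySem.Dict.getD_counter]
    rfl
  · rw [PySem.Dict.keys_counter, pv_keys_sum]
    refine Finset.sum_congr rfl (fun g _ => ?_)
    rw [PySem.Dict.getD_counter, PySem.Dict.getD_counter]
    rfl

theorem pv_B_eq (summ ref : List String) :
    bi_gram_match_py_alt summ ref
    = ∑ g ∈ (pvGrams summ).toFinset, min (((pvGrams summ).count g : Int)) ((ref.count g : Int)) := by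
  simp only [bi_gram_match_py_alt]
  rw [← List.foldl_map
        (f := fun i => PySem.Str.join " " (PySem.List.slice summ (some i) (some (i + 2))))
        (g := fun (st : PySem.Dict String Int × Int) g =>
          if st.1.getD g 0 > 0 then (st.1.modify g 0 (fun v => v - 1), st.2 + 1) else st)]
  rw [show (List.map (fun i => PySem.Str.join " " (PySem.List.slice summ (some i) (some (i + 2))))
        (PySem.List.pyRange 0 (PySem.List.len summ - 1))) = pvGrams summ from rfl]
  rw [pv_consume (pvGrams summ) (PySem.Dict.counter ref) 0
        (fun g => by rw [PySem.Dict.getD_counter]; positivity)]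
  rw [zero_add]
  refine Finset.sum_congr rfl (fun g _ => ?_)
  rw [PySem.Dict.getD_counter]

-- ===== VERDICT (by name: the statement is the Claim_ definition above) =====
theorem bi_gram_match_py_spec : Claim_equal_bi_gram_match_py := by
  intro summ ref _
  unfold Spec_bi_gram_match_py
  rw [pv_A_eq, pv_B_eq]
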